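-- pv_equiv track=rewrite | github.com/Victor994154/Carmona2 | engine.py | match_fact
-- ===== SOURCE A (Python) =====
-- from typing import Dict, Iterable, Iterator, List, Optional, Sequence, Set, Tuple
--
-- Fact = Tuple[str, ...]
--
-- Substitution = Dict[str, str]
--
-- def is_variable(token: str) -> bool:
--     """Convención simple: una variable empieza con '?'."""
--     return isinstance(token, str) and token.startswith("?")
--
-- def match_fact(pattern: Fact, fact: Fact, theta: Optional[Substitution] = None) -> Optional[Substitution]:
--     """
--     Intenta hacer match entre un patrón y un hecho concreto.
--     Solo soporta variables del lado del patrón.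
--     """
--     if len(pattern) != len(fact):
--         return None
--
--     theta = dict(theta or {})
--
--     for pattern_token, fact_token in zip(pattern, fact):
--         if is_variable(pattern_token):
--             current = theta.get(pattern_token)
--             if current is None:
--                 theta[pattern_token] = fact_token
--             elif current != fact_token:
--                 return None
--         else:
--             if pattern_token != fact_token:
--                 return None
--
--     return theta
-- ===== SOURCE B (Python) =====
-- def match_fact(pattern, fact, theta=None):
--     """Declarative re-formulation: constants must coincide positionally; the
--     combined list of theta bindings and variable sightings must be pairwise
--     conflict-free; the substitution is theta extended with each variable's
--     first sighting."""
--     if len(pattern) != len(fact):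
--         return None
--     pairs = list(zip(pattern, fact))
--     if any(p != f for p, f in pairs if not p.startswith("?")):
--         return None
--     base = dict(theta or {})
--     aug = list(base.items()) + [(p, f) for p, f in pairs if p.startswith("?")]
--     if any(a[0] == b[0] and a[1] != b[1]
--            for i, a in enumerate(aug) for b in aug[i + 1:]):
--         return None
--     result = base
--     for p, f in pairs:
--         if p.startswith("?") and p not in result:
--             result[p] = f
--     return result
-- ===== Notes on version B (the rewrite author's own statement) =====
-- stated objective: alternative
-- what changed: Replaces A's single incremental loop (bind-or-compare per position) by a declarative formulation: a constant-position check, then a global pairwise conflict test over theta's bindings plus all variable sightings, and finally a first-sighting insertion pass to build the substitution.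
import Mathlib
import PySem

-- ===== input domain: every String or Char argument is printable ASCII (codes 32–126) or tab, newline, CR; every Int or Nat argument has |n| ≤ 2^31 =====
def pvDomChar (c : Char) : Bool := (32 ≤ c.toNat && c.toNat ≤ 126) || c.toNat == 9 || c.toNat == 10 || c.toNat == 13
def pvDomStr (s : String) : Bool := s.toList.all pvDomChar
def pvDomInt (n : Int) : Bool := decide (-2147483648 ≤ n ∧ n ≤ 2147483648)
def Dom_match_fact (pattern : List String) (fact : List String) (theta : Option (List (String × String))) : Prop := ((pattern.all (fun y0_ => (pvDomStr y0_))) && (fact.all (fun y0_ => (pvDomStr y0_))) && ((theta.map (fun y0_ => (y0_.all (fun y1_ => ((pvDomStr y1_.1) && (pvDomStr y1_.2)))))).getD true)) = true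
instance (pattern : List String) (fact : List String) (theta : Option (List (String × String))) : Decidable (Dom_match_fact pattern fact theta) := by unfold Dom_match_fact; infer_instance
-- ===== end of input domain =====

-- B replaces A's single incremental bind-or-compare loop by a declarative formulation
-- (constant check, global pairwise conflict test, first-sighting insertion pass);
-- objective: alternative, not faster.

-- ===== PORT A =====
-- A's single for-loop over zip(pattern, fact), early return = none
def matchLoopA (pairs : List (String × String)) (theta : PySem.Dict String String) :
    Option (PySem.Dict String String) :=
  match pairs with
  | [] => some theta
  | (pt, ft) :: rest =>
    if PySem.Str.startswith pt "?" then
      match theta.get? pt with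
      | none => matchLoopA rest (theta.insert pt ft)
      | some current => if current ≠ ft then none else matchLoopA rest theta
    else
      if pt ≠ ft then none else matchLoopA rest theta

def match_fact (pattern : List String) (fact : List String) (theta : Option (List (String × String))) : Option (List (String × String)) :=
  if pattern.length ≠ fact.length then none
  else
    (matchLoopA (pattern.zip fact) (PySem.Dict.ofList (theta.getD []))).map (·.items)

-- ===== PORT B =====
-- Source B: any(a[0] == b[0] and a[1] != b[1] for i, a in enumerate(aug) for b in aug[i+1:])
def hasConflict (aug : List (String × String)) : Bool :=
  (PySem.List.enumerate aug).any (fun ia =>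
    (PySem.List.slice aug (some (ia.1 + 1)) none).any (fun b => ia.2.1 == b.1 && ia.2.2 != b.2))

def match_fact_alt (pattern : List String) (fact : List String) (theta : Option (List (String × String))) : Option (List (String × String)) :=
  if pattern.length ≠ fact.length then none
  else if (pattern.zip fact).any (fun pf => !(PySem.Str.startswith pf.1 "?") && pf.1 ≠ pf.2) then none
  else if hasConflict ((PySem.Dict.ofList (theta.getD [])).items
      ++ (pattern.zip fact).filter (fun pf => PySem.Str.startswith pf.1 "?")) then none
  else
    some (((pattern.zip fact).foldl (fun d pf =>
      if PySem.Str.startswith pf.1 "?" && !(d.contains pf.1) then d.insert pf.1 pf.2 else d)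
      (PySem.Dict.ofList (theta.getD []))).items)

-- ===== PRECONDITION & SPEC =====
def Spec_match_fact (pattern : List String) (fact : List String) (theta : Option (List (String × String))) (out : Option (List (String × String))) : Prop := out = match_fact_alt pattern fact theta
instance (pattern : List String) (fact : List String) (theta : Option (List (String × String))) (out : Option (List (String × String))) : Decidable (Spec_match_fact pattern fact theta out) := by unfold Spec_match_fact; infer_instance

-- ===== CLAIM (what is proved, stated in full; the proofs are below) =====
def Claim_equal_match_fact : Prop := ∀ (pattern : List String) (fact : List String) (theta : Option (List (String × String))), Dom_match_fact pattern fact theta → Spec_match_fact pattern fact theta (match_fact pattern fact theta)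

-- ===== LEMMAS AND PROOFS =====

-- the agreement relation B's conflict test decides
def pvS (a b : String × String) : Prop := a.1 = b.1 → a.2 = b.2

-- adjacent-pairs recursive form of B's conflict test
def pairAnyB (l : List (String × String)) : Bool :=
  match l with
  | [] => false
  | x :: t => t.any (fun b => x.1 == b.1 && x.2 != b.2) || pairAnyB t

theorem enumerate_slice_any (l : List (String × String)) (s : Nat) (full : List (String × String))
    (h : full.drop s = l) :
    ((PySem.List.enumerate l s).any (fun ia =>
      (PySem.List.slice full (some (ia.1 + 1)) none).any (fun b => ia.2.1 == b.1 && ia.2.2 != b.2)))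
      = pairAnyB l := by
  induction l generalizing s with
  | nil => simp [PySem.List.enumerate_nil, pairAnyB]
  | cons x t ih =>
    have h' : full.drop (s + 1) = t := by rw [← List.tail_drop, h]; rfl
    simp only [PySem.List.enumerate_cons, List.any_cons]
    rw [show ((s : Int) + 1) = ((s + 1 : Nat) : Int) by push_cast; ring]
    rw [PySem.List.slice_from_natCast, h', ih (s + 1) h']
    rfl

theorem hasConflict_eq_pairAnyB (l : List (String × String)) : hasConflict l = pairAnyB l := by
  unfold hasConflict
  exact enumerate_slice_any l 0 l (by simp)

theorem pairAnyB_false_iff (l : List (String × String)) :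
    pairAnyB l = false ↔ l.Pairwise pvS := by
  induction l with
  | nil => simp [pairAnyB]
  | cons x t ih =>
    simp only [pairAnyB, Bool.or_eq_false_iff, List.any_eq_false, List.pairwise_cons, ih, pvS]
    constructor
    · rintro ⟨h1, h2⟩
      refine ⟨fun b hb hk => ?_, h2⟩
      have := h1 b hb
      simp only [Bool.and_eq_true, beq_iff_eq, bne_iff_ne, not_and, ne_eq, not_not] at this
      exact this hk
    · rintro ⟨h1, h2⟩
      refine ⟨fun b hb => ?_, h2⟩
      simp only [Bool.and_eq_true, beq_iff_eq, bne_iff_ne, not_and, ne_eq, not_not]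
      exact fun hk => h1 b hb hk

theorem pairAnyB_eq_of_iff {X Y : List (String × String)}
    (h : X.Pairwise pvS ↔ Y.Pairwise pvS) : pairAnyB X = pairAnyB Y := by
  cases hX : pairAnyB X <;> cases hY : pairAnyB Y
  · rfl
  · have hf := (pairAnyB_false_iff Y).mpr (h.mp ((pairAnyB_false_iff X).mp hX))
    rw [hY] at hf; exact hf.symm
  · have hf := (pairAnyB_false_iff X).mpr (h.mpr ((pairAnyB_false_iff Y).mp hY))
    rw [hX] at hf; exact hf
  · rfl

theorem pairAnyB_true_of_not_pairwise {X : List (String × String)}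
    (h : ¬ X.Pairwise pvS) : pairAnyB X = true := by
  cases hX : pairAnyB X
  · exact absurd ((pairAnyB_false_iff X).mp hX) h
  · rfl

-- pairwise agreement holds inside a dict's items (keys are distinct)
theorem pairwise_pvS_items (d : PySem.Dict String String) (hnd : d.keys.Nodup) :
    d.items.Pairwise pvS := by
  have hk : (d.items.map Prod.fst).Nodup := by simpa [PySem.Dict.keys] using hnd
  have hp : d.items.Pairwise (fun a b => a.1 ≠ b.1) := List.pairwise_map.mp hk
  exact hp.imp (fun {a b} hne => fun h => absurd h hne)

-- A's loop equals B's decomposition: constants checked, a global pairwise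
-- conflict test over d.items ++ variable sightings, then first-sighting inserts
theorem loopA_char (pairs : List (String × String)) (d : PySem.Dict String String)
    (hnd : d.keys.Nodup) :
    matchLoopA pairs d =
      if pairs.any (fun pf => !(PySem.Str.startswith pf.1 "?") && pf.1 ≠ pf.2) then none
      else if pairAnyB (d.items ++ pairs.filter (fun pf => PySem.Str.startswith pf.1 "?")) then none
      else some (pairs.foldl (fun d pf =>
        if PySem.Str.startswith pf.1 "?" && !(d.contains pf.1) then d.insert pf.1 pf.2 else d) d) := by
  induction pairs generalizing d with
  | nil =>
    simp [matchLoopA, (pairAnyB_false_iff _).mpr (pairwise_pvS_items d hnd)]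
  | cons hd rest ih =>
    obtain ⟨p, f⟩ := hd
    by_cases hv : PySem.Str.startswith p "?"
    · cases hg : d.get? p with
      | none =>
        have hc : d.contains p = false := by
          rw [PySem.Dict.contains_eq_isSome_get? d p, hg]; rfl
        have hitems : (d.insert p f).items = d.items ++ [(p, f)] :=
          PySem.Dict.items_insert_of_not_contains d f hc
        have hnd' : (d.insert p f).keys.Nodup := PySem.Dict.nodup_keys_insert d p f hnd
        simp only [matchLoopA, hv, if_true, hg]
        rw [ih _ hnd']
        simp only [List.any_cons, List.filter_cons, List.foldl_cons, hv, hc, Bool.not_true,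
          Bool.false_and, Bool.false_or, Bool.not_false, Bool.and_self, if_true, hitems,
          List.append_assoc, List.singleton_append]
      | some cur =>
        have hc : d.contains p = true := by
          rw [PySem.Dict.contains_eq_isSome_get? d p, hg]; rfl
        have hmem : (p, cur) ∈ d.items := PySem.Dict.mem_items_of_get?_eq_some d hg
        by_cases hcf : cur = f
        · subst hcf
          -- the extra sighting (p, cur) is redundant: it is already among d.items
          have hiff : (d.items ++ (p, cur) :: rest.filter (fun pf => PySem.Str.startswith pf.1 "?")).Pairwise pvS
              ↔ (d.items ++ rest.filter (fun pf => PySem.Str.startswith pf.1 "?")).Pairwise pvS := by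
            simp only [List.pairwise_append, List.pairwise_cons]
            constructor
            · rintro ⟨h1, ⟨h2, h3⟩, h4⟩
              exact ⟨h1, h3, fun a ha b hb => h4 a ha b (List.mem_cons_of_mem _ hb)⟩
            · rintro ⟨h1, h3, h4⟩
              refine ⟨h1, ⟨fun b hb => h4 _ hmem b hb, h3⟩, ?_⟩
              rintro ⟨a1, a2⟩ ha b hb
              rcases List.mem_cons.mp hb with rfl | hb'
              · intro hk
                have hga : d.get? a1 = some a2 := PySem.Dict.get?_of_mem_items d ha hnd
                rw [show a1 = p from hk] at hga
                exact Option.some.inj (hga.symm.trans hg)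
              · exact h4 _ ha b hb'
          have hEq := pairAnyB_eq_of_iff hiff
          simp only [matchLoopA, hv, if_true, hg, ne_eq, not_true_eq_false, if_false, ite_not]
          rw [ih _ hnd]
          simp only [List.any_cons, List.filter_cons, List.foldl_cons, hv, hc, Bool.not_true,
            Bool.false_and, Bool.false_or, Bool.and_false, if_true, ne_eq, Bool.false_eq_true,
            if_false]
          rw [hEq]
        · -- conflicting sighting: A returns none, and the pairwise test fails
          have hnp : ¬ (d.items ++ (p, f) :: rest.filter (fun pf => PySem.Str.startswith pf.1 "?")).Pairwise pvS := by
            intro hpw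
            exact hcf ((List.pairwise_append.mp hpw).2.2 (p, cur) hmem (p, f) (by simp) rfl)
          simp only [matchLoopA, hv, if_true, hg, ne_eq, hcf, not_false_eq_true, if_true]
          simp only [List.any_cons, List.filter_cons, hv, Bool.not_true, Bool.false_and,
            Bool.false_or, if_true]
          rw [pairAnyB_true_of_not_pairwise hnp]
          simp
    · by_cases hpf : p = f
      · subst hpf
        simp only [matchLoopA, hv, if_false, ne_eq, not_true_eq_false, if_false, ite_not,
          Bool.false_eq_true]
        rw [ih _ hnd]
        simp only [List.any_cons, List.filter_cons, List.foldl_cons, hv, Bool.not_false, ne_eq,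
          not_true_eq_false, decide_false, Bool.and_false, Bool.false_or, Bool.false_and,
          if_false, Bool.false_eq_true]
      · have hv' : PySem.Str.startswith p "?" = false := by
          cases hb : PySem.Str.startswith p "?"
          · rfl
          · exact absurd hb hv
        have hany : (((p, f) :: rest).any (fun pf => !(PySem.Str.startswith pf.1 "?") && pf.1 ≠ pf.2)) = true := by
          simp only [List.any_cons, hv', Bool.not_false, Bool.true_and, ne_eq, hpf,
            not_false_eq_true, decide_true, Bool.true_or]
        rw [if_pos hany]
        simp only [matchLoopA, hv', Bool.false_eq_true, if_false, ne_eq, hpf, not_false_eq_true,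
          if_true]

theorem map_items_ifs (c1 c2 : Prop) [Decidable c1] [Decidable c2] (F : PySem.Dict String String) :
    Option.map (·.items) (if c1 then none else if c2 then none else some F)
      = if c1 then none else if c2 then none else some F.items := by
  split_ifs <;> rfl

-- ===== VERDICT (by name: the statement is the Claim_ definition above) =====
theorem match_fact_spec : Claim_equal_match_fact := by
  intro pattern fact theta _
  unfold Spec_match_fact match_fact match_fact_alt
  by_cases hl : pattern.length ≠ fact.length
  · rw [if_pos hl, if_pos hl]
  · rw [if_neg hl, if_neg hl]
    rw [hasConflict_eq_pairAnyB, loopA_char _ _ (PySem.Dict.nodup_keys_ofList _)]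
    exact map_items_ifs _ _ _
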